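-- pv_equiv track=rewrite | github.com/Quisette/shogiban-anki | __init__.py | get_mochi
-- ===== SOURCE A (Python) =====
-- def get_mochi(origin):
--     sente_res = list()
--     gote_res = list()
--     if origin == "-":
--         return sente_res, gote_res
--     tmp = ""
--     for c in origin:
--         if c.isdigit():
--             tmp += c
--         else:
--             if tmp == "":
--                 tmp = "1"
--             tmp = tuple([c.lower(), int(tmp)])
--             if c.islower():
--                 gote_res.append(tmp)
--             else:
--                 sente_res.append(tmp)
--             tmp = ""
--     return sente_res, gote_res
-- ===== SOURCE B (Python) =====
-- import re
--
--
-- def get_mochi(origin):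
--     if origin == "-":
--         return [], []
--     tokens = re.findall(r'(\d*)(\D)', origin)
--     sente = [(ch.lower(), int(n or "1")) for n, ch in tokens if not ch.islower()]
--     gote = [(ch.lower(), int(n or "1")) for n, ch in tokens if ch.islower()]
--     return sente, gote
-- ===== Notes on version B (the rewrite author's own statement) =====
-- stated objective: idiomatic
-- what changed: Replaced the hand-written digit-accumulation state machine with a regex tokenizer (re.findall(r'(\d*)(\D)')) followed by two comprehensions that filter the token list into sente/gote.
import Mathlib
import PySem

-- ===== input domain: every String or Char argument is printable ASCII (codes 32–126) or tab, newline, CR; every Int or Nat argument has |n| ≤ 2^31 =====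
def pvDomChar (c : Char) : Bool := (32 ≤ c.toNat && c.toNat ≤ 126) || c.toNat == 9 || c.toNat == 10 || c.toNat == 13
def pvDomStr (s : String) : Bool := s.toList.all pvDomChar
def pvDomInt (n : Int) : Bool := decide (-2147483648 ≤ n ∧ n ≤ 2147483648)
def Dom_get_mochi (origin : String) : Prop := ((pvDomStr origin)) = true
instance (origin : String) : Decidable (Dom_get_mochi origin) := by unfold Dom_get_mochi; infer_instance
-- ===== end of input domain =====

-- B replaces A's hand-written digit-accumulation state machine with a regex-style
-- tokenizer followed by two filters over the token list (objective: more idiomatic).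

-- ===== PORT A =====
-- int(tmp) where tmp is always a nonempty digit string; exact there (ofStr? = some)
def pyIntStr (s : String) : Int := (PySem.Int.ofStr? s).getD 0

-- the for-loop of A: state (sente_res, gote_res, tmp)
def gmLoopA (sente gote : List (String × Int)) (tmp : String) : List Char → (List (String × Int)) × (List (String × Int))
  | [] => (sente, gote)
  | c :: rest =>
    if PySem.Chars.isdigit c then gmLoopA sente gote (tmp.push c) rest
    else
      let t := if tmp = "" then "1" else tmp
      let item : String × Int := (String.mk [PySem.Chars.lowerChar c], pyIntStr t)
      if PySem.Chars.islower c then gmLoopA sente (gote ++ [item]) "" rest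
      else gmLoopA (sente ++ [item]) gote "" rest

def get_mochi (origin : String) : (List (String × Int)) × (List (String × Int)) :=
  if origin = "-" then ([], []) else gmLoopA [] [] "" origin.toList

-- ===== PORT B =====
-- re.findall(r'(\d*)(\D)', s): maximal digit run + one non-digit; trailing digits match nothing
def gmTokenize (ds : String) : List Char → List (String × Char)
  | [] => []
  | c :: rest =>
    if PySem.Chars.isdigit c then gmTokenize (ds.push c) rest
    else (ds, c) :: gmTokenize "" rest

-- (ch.lower(), int(n or "1"))
def gmItem (t : String × Char) : String × Int :=
  (String.mk [PySem.Chars.lowerChar t.2], pyIntStr (if t.1 = "" then "1" else t.1))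

def get_mochi_alt (origin : String) : (List (String × Int)) × (List (String × Int)) :=
  if origin = "-" then ([], [])
  else
    let toks := gmTokenize "" origin.toList
    ((toks.filter (fun t => !PySem.Chars.islower t.2)).map gmItem,
     (toks.filter (fun t => PySem.Chars.islower t.2)).map gmItem)

-- ===== PRECONDITION & SPEC =====
def Spec_get_mochi (origin : String) (out : (List (String × Int)) × (List (String × Int))) : Prop := out = get_mochi_alt origin
instance (origin : String) (out : (List (String × Int)) × (List (String × Int))) : Decidable (Spec_get_mochi origin out) := by unfold Spec_get_mochi; infer_instance

-- ===== CLAIM (what is proved, stated in full; the proofs are below) =====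
def Claim_equal_get_mochi : Prop := ∀ (origin : String), Dom_get_mochi origin → Spec_get_mochi origin (get_mochi origin)

-- ===== LEMMAS AND PROOFS =====
theorem gmLoopA_eq (cs : List Char) : ∀ (sente gote : List (String × Int)) (tmp : String),
    gmLoopA sente gote tmp cs =
      (sente ++ ((gmTokenize tmp cs).filter (fun t => !PySem.Chars.islower t.2)).map gmItem,
       gote ++ ((gmTokenize tmp cs).filter (fun t => PySem.Chars.islower t.2)).map gmItem) := by
  induction cs with
  | nil => intro sente gote tmp; simp [gmLoopA, gmTokenize]
  | cons c rest ih =>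
    intro sente gote tmp
    by_cases hd : PySem.Chars.isdigit c = true
    · simp [gmLoopA, gmTokenize, hd, ih]
    · by_cases hl : PySem.Chars.islower c = true
      · simp [gmLoopA, gmTokenize, hd, hl, ih, gmItem]
      · simp [gmLoopA, gmTokenize, hd, hl, ih, gmItem]

-- ===== VERDICT (by name: the statement is the Claim_ definition above) =====
theorem get_mochi_spec : Claim_equal_get_mochi := by
  intro origin _
  unfold Spec_get_mochi get_mochi get_mochi_alt
  by_cases h : origin = "-"
  · simp [h]
  · simp [h, gmLoopA_eq]
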